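-- pv_equiv track=rewrite | github.com/isinuyk/vr_motion | parameter_sweep.py | _combo_dicts
-- ===== SOURCE A (Python) =====
-- import itertools
--
-- def _combo_dicts(grid):
--     keys = list(grid.keys())
--     values = [grid[k] for k in keys]
--     for vals in itertools.product(*values):
--         combo = dict(zip(keys, vals))
--         # Ensure valid polynomial settings.
--         if combo["TRAJ_POLY_DEG"] >= combo["TRAJ_POLY_WIN"]:
--             continue
--         # Keep odd windows for centered local fitting.
--         if combo["TRAJ_POLY_WIN"] % 2 == 0:
--             continue
--         yield combo
-- ===== SOURCE B (Python) =====
-- def _combo_dicts(grid):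
--     keys = list(grid.keys())
--
--     def rec(i, combo):
--         if i == len(keys):
--             # Leaf: the full assignment; re-check both constraints (also raises
--             # KeyError here, like A, if the grid lacks the polynomial keys).
--             if combo["TRAJ_POLY_DEG"] < combo["TRAJ_POLY_WIN"] and combo["TRAJ_POLY_WIN"] % 2 != 0:
--                 yield combo
--             return
--         k = keys[i]
--         for v in grid[k]:
--             # Prune the whole subtree as soon as a constraint is already violated.
--             if k == "TRAJ_POLY_WIN" and (v % 2 == 0 or ("TRAJ_POLY_DEG" in combo and combo["TRAJ_POLY_DEG"] >= v)):
--                 continue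
--             if k == "TRAJ_POLY_DEG" and ("TRAJ_POLY_WIN" in combo and v >= combo["TRAJ_POLY_WIN"]):
--                 continue
--             yield from rec(i + 1, {**combo, k: v})
--
--     yield from rec(0, {})
-- ===== Notes on version B (the rewrite author's own statement) =====
-- stated objective: alternative
-- what changed: Replaces itertools.product generate-then-filter with a recursive key-by-key enumeration that prunes a whole subtree as soon as an assigned TRAJ_POLY_WIN/TRAJ_POLY_DEG value already violates a constraint, yielding completed dicts at the leaves in the same order.
import Mathlib
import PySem

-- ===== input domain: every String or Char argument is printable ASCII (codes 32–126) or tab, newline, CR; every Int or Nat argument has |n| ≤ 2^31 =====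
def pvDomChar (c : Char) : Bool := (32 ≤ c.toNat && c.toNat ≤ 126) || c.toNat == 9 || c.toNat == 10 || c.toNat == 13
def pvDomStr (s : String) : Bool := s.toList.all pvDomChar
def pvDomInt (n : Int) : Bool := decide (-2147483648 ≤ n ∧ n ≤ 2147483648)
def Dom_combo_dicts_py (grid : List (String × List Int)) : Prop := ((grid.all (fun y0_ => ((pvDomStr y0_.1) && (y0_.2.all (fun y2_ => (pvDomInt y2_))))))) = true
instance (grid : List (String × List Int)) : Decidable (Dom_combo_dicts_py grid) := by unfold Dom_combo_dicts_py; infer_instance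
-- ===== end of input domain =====

-- B replaces A's generate-then-filter over itertools.product by a recursive enumeration
-- over the keys that prunes a subtree as soon as an assigned TRAJ_POLY_WIN / TRAJ_POLY_DEG
-- value already violates a constraint (objective: alternative decomposition; same yield order).

-- ===== PORT A =====
-- itertools.product(*values) (leftmost factor varies slowest)
def pvProduct (ls : List (List Int)) : List (List Int) :=
  ls.foldr (fun l acc => l.flatMap (fun x => acc.map (x :: ·))) [[]]

def combo_dicts_py (grid : List (String × List Int)) : List (List (String × Int)) :=
  let d := PySem.Dict.ofList grid
  let keys := d.keys
  let values := keys.map (fun k => d.getD k [])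
  -- the generator's yields, collected in order; combo["…"] is total here, Pre_ excludes the KeyError inputs
  (pvProduct values).foldl (fun acc vals =>
    if (PySem.Dict.ofList (keys.zip vals)).getD "TRAJ_POLY_DEG" 0 ≥
       (PySem.Dict.ofList (keys.zip vals)).getD "TRAJ_POLY_WIN" 0 then acc
    else if PySem.Int.mod ((PySem.Dict.ofList (keys.zip vals)).getD "TRAJ_POLY_WIN" 0) 2 = 0 then acc
    else acc ++ [(PySem.Dict.ofList (keys.zip vals)).items]) []

-- ===== PORT B =====
-- rec(i, combo): iterate over grid[keys[i]], pruning violated subtrees; the leaf re-checks both constraints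
def altGo (g : PySem.Dict String (List Int)) :
    List String → PySem.Dict String Int → List (List (String × Int))
  | [], combo =>
      if combo.getD "TRAJ_POLY_DEG" 0 < combo.getD "TRAJ_POLY_WIN" 0 ∧
         PySem.Int.mod (combo.getD "TRAJ_POLY_WIN" 0) 2 ≠ 0
      then [combo.items] else []
  | k :: rest, combo =>
      (g.getD k []).foldl (fun acc v =>
        if k = "TRAJ_POLY_WIN" ∧ (PySem.Int.mod v 2 = 0 ∨
             (combo.contains "TRAJ_POLY_DEG" ∧ combo.getD "TRAJ_POLY_DEG" 0 ≥ v)) then acc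
        else if k = "TRAJ_POLY_DEG" ∧ combo.contains "TRAJ_POLY_WIN" ∧
             v ≥ combo.getD "TRAJ_POLY_WIN" 0 then acc
        else acc ++ altGo g rest (combo.insert k v)) []

def combo_dicts_py_alt (grid : List (String × List Int)) : List (List (String × Int)) :=
  let g := PySem.Dict.ofList grid
  altGo g g.keys PySem.Dict.empty

-- ===== PRECONDITION & SPEC =====
-- Pre_ excludes exactly the inputs on which the Python A raises KeyError: both polynomial
-- keys must be present, unless some value list is empty (empty product: no combo is built).
def Pre_combo_dicts_py (grid : List (String × List Int)) : Prop :=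
  ("TRAJ_POLY_DEG" ∈ (PySem.Dict.ofList grid).keys ∧
   "TRAJ_POLY_WIN" ∈ (PySem.Dict.ofList grid).keys) ∨
  [] ∈ (PySem.Dict.ofList grid).values
instance (grid : List (String × List Int)) : Decidable (Pre_combo_dicts_py grid) := by
  unfold Pre_combo_dicts_py; infer_instance

def pvWitness_combo_dicts_py : (List (String × List Int)) :=
  [("TRAJ_POLY_DEG", [1, 2]), ("TRAJ_POLY_WIN", [3, 4]), ("X", [0, 7])]

def Spec_combo_dicts_py (grid : List (String × List Int)) (out : List (List (String × Int))) : Prop := out = combo_dicts_py_alt grid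
instance (grid : List (String × List Int)) (out : List (List (String × Int))) : Decidable (Spec_combo_dicts_py grid out) := by unfold Spec_combo_dicts_py; infer_instance

-- ===== CLAIM (what is proved, stated in full; the proofs are below) =====
def Claim_equal_combo_dicts_py : Prop := ∀ (grid : List (String × List Int)), Dom_combo_dicts_py grid → Pre_combo_dicts_py grid → Spec_combo_dicts_py grid (combo_dicts_py grid)

-- ===== LEMMAS AND PROOFS =====

-- a foldl that either skips (two guards, matching the two 'continue'/prune branches) or appends
theorem foldl_skip2 {α β : Type} (l : List α) (c1 c2 : α → Prop) [DecidablePred c1]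
    [DecidablePred c2] (h : α → List β) (init : List β) :
    l.foldl (fun acc v => if c1 v then acc else if c2 v then acc else acc ++ h v) init
      = init ++ l.flatMap (fun v => if c1 v then [] else if c2 v then [] else h v) := by
  induction l generalizing init with
  | nil => simp
  | cons x xs ih =>
      simp only [List.foldl_cons, List.flatMap_cons]
      rw [ih]
      by_cases h1 : c1 x <;> by_cases h2 : c2 x <;> simp [h1, h2]

theorem flatMap_flatMap {α β γ : Type} (l : List α) (f : α → List β) (g : β → List γ) :
    (l.flatMap f).flatMap g = l.flatMap (fun x => (f x).flatMap g) := by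
  induction l with
  | nil => rfl
  | cons x xs ih => simp only [List.flatMap_cons, List.flatMap_append, ih]

-- the dict obtained by inserting a list of pairs (dict(zip(...)) continued from combo)
def fullOf (combo : PySem.Dict String Int) (l : List (String × Int)) : PySem.Dict String Int :=
  l.foldl (fun c p => c.insert p.1 p.2) combo

theorem fullOf_cons (combo : PySem.Dict String Int) (p : String × Int) (l : List (String × Int)) :
    fullOf combo (p :: l) = fullOf (combo.insert p.1 p.2) l := rfl

theorem getD_fullOf_of_not_key (l : List (String × Int)) (k : String)
    (hk : ∀ p ∈ l, p.1 ≠ k) (combo : PySem.Dict String Int) (d0 : Int) :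
    (fullOf combo l).getD k d0 = combo.getD k d0 := by
  induction l generalizing combo with
  | nil => rfl
  | cons p ps ih =>
      have h1 : p.1 ≠ k := hk p (List.mem_cons_self ..)
      have h2 : ∀ q ∈ ps, q.1 ≠ k := fun q hq => hk q (List.mem_cons_of_mem _ hq)
      simp only [fullOf, List.foldl_cons] at *
      rw [ih h2, PySem.Dict.getD_insert_of_ne _ _ _ (Ne.symm h1)]

-- the leaf predicate of B, on the completed dict
def pvPred (combo : PySem.Dict String Int) : Bool :=
  decide (combo.getD "TRAJ_POLY_DEG" 0 < combo.getD "TRAJ_POLY_WIN" 0) &&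
  decide (PySem.Int.mod (combo.getD "TRAJ_POLY_WIN" 0) 2 ≠ 0)

-- B's pruning recursion enumerates exactly the completed dicts of the product, filtered by pvPred
theorem altGo_eq (g : PySem.Dict String (List Int)) (keys : List String)
    (combo : PySem.Dict String Int) (hnd : keys.Nodup)
    (hdisj : ∀ k', combo.contains k' = true → k' ∉ keys) :
    altGo g keys combo =
      (pvProduct (keys.map (fun k => g.getD k []))).flatMap (fun vals =>
        if pvPred (fullOf combo (keys.zip vals))
        then [(fullOf combo (keys.zip vals)).items] else []) := by
  induction keys generalizing combo with
  | nil => simp [altGo, pvProduct, fullOf, pvPred]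
  | cons k rest ih =>
      have hknr : k ∉ rest := (List.nodup_cons.mp hnd).1
      have hndr : rest.Nodup := (List.nodup_cons.mp hnd).2
      have hstep : pvProduct ((k :: rest).map (fun k => g.getD k [])) =
          (g.getD k []).flatMap
            (fun v => (pvProduct (rest.map (fun k => g.getD k []))).map (v :: ·)) := by
        simp [pvProduct]
      rw [hstep, flatMap_flatMap]
      simp only [altGo]
      rw [foldl_skip2]
      simp only [List.nil_append, List.flatMap_def]
      apply congrArg List.flatten
      apply List.map_congr_left
      intro v _
      rw [List.map_map, ← List.flatMap_def]
      simp only [Function.comp_def, List.zip_cons_cons, fullOf_cons]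
      -- k's value, and any key already in combo, persist to the completed dict
      have hpersist : ∀ (vals : List Int) (k' : String), k' ∉ rest →
          (fullOf (combo.insert k v) (rest.zip vals)).getD k' 0
            = (combo.insert k v).getD k' 0 := by
        intro vals k' hk'
        apply getD_fullOf_of_not_key
        intro p hp hpk
        exact hk' (hpk ▸ (List.of_mem_zip hp).1)
      by_cases h1 : k = "TRAJ_POLY_WIN" ∧ (PySem.Int.mod v 2 = 0 ∨
          (combo.contains "TRAJ_POLY_DEG" ∧ combo.getD "TRAJ_POLY_DEG" 0 ≥ v))
      · rw [if_pos h1]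
        symm
        rw [List.flatMap_eq_nil_iff]
        intro vals _
        rw [if_neg]
        obtain ⟨hk, hbad⟩ := h1
        subst hk
        have hwin : (fullOf (combo.insert "TRAJ_POLY_WIN" v) (rest.zip vals)).getD "TRAJ_POLY_WIN" 0 = v := by
          rw [hpersist vals _ hknr, PySem.Dict.getD_insert_self]
        intro hpred
        simp only [pvPred, Bool.and_eq_true, decide_eq_true_eq] at hpred
        rcases hbad with hmod | ⟨hcont, hge⟩
        · have := hpred.2
          rw [hwin] at this
          exact this hmod
        · have hdegmem := hdisj _ hcont
          have hdegne : ("TRAJ_POLY_DEG" : String) ≠ "TRAJ_POLY_WIN" := by decide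
          have hdnr : "TRAJ_POLY_DEG" ∉ rest := fun h => hdegmem (List.mem_cons_of_mem _ h)
          have hdeg : (fullOf (combo.insert "TRAJ_POLY_WIN" v) (rest.zip vals)).getD "TRAJ_POLY_DEG" 0
              = combo.getD "TRAJ_POLY_DEG" 0 := by
            rw [hpersist vals _ hdnr, PySem.Dict.getD_insert_of_ne _ _ _ hdegne]
          have := hpred.1
          rw [hwin, hdeg] at this
          omega
      · rw [if_neg h1]
        by_cases h2 : k = "TRAJ_POLY_DEG" ∧ combo.contains "TRAJ_POLY_WIN" ∧
            v ≥ combo.getD "TRAJ_POLY_WIN" 0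
        · rw [if_pos h2]
          symm
          rw [List.flatMap_eq_nil_iff]
          intro vals _
          rw [if_neg]
          obtain ⟨hk, hcont, hge⟩ := h2
          subst hk
          have hdeg : (fullOf (combo.insert "TRAJ_POLY_DEG" v) (rest.zip vals)).getD "TRAJ_POLY_DEG" 0 = v := by
            rw [hpersist vals _ hknr, PySem.Dict.getD_insert_self]
          have hwinmem := hdisj _ hcont
          have hwinne : ("TRAJ_POLY_WIN" : String) ≠ "TRAJ_POLY_DEG" := by decide
          have hwnr : "TRAJ_POLY_WIN" ∉ rest := fun h => hwinmem (List.mem_cons_of_mem _ h)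
          have hwin : (fullOf (combo.insert "TRAJ_POLY_DEG" v) (rest.zip vals)).getD "TRAJ_POLY_WIN" 0
              = combo.getD "TRAJ_POLY_WIN" 0 := by
            rw [hpersist vals _ hwnr, PySem.Dict.getD_insert_of_ne _ _ _ hwinne]
          intro hpred
          simp only [pvPred, Bool.and_eq_true, decide_eq_true_eq] at hpred
          have := hpred.1
          rw [hwin, hdeg] at this
          omega
        · rw [if_neg h2]
          have hdisj' : ∀ k', (combo.insert k v).contains k' = true → k' ∉ rest := by
            intro k' hc
            rw [PySem.Dict.contains_insert] at hc
            rcases Bool.or_eq_true_iff.mp hc with hkk | hcc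
            · exact (beq_iff_eq.mp hkk) ▸ hknr
            · exact fun h => hdisj k' hcc (List.mem_cons_of_mem _ h)
          rw [ih (combo.insert k v) hndr hdisj']

-- ===== VERDICT (by name: the statement is the Claim_ definition above) =====
theorem combo_dicts_py_spec : Claim_equal_combo_dicts_py := by
  intro grid _ _
  unfold Spec_combo_dicts_py combo_dicts_py combo_dicts_py_alt
  rw [foldl_skip2]
  rw [altGo_eq _ _ _ (PySem.Dict.nodup_keys_ofList grid)
      (fun k' hc => by rw [PySem.Dict.contains_empty] at hc; exact absurd hc (by simp))]
  simp only [List.nil_append, List.flatMap_def]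
  apply congrArg List.flatten
  apply List.map_congr_left
  intro vals _
  have hfull : PySem.Dict.ofList ((PySem.Dict.ofList grid).keys.zip vals)
      = fullOf PySem.Dict.empty ((PySem.Dict.ofList grid).keys.zip vals) := rfl
  rw [hfull]
  by_cases hp : pvPred (fullOf PySem.Dict.empty ((PySem.Dict.ofList grid).keys.zip vals)) = true
  · rw [if_pos hp]
    simp only [pvPred, Bool.and_eq_true, decide_eq_true_eq] at hp
    obtain ⟨h1, h2⟩ := hp
    rw [if_neg (by omega), if_neg h2]
  · rw [if_neg hp]
    simp only [pvPred, Bool.and_eq_true, decide_eq_true_eq, not_and, not_not] at hp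
    by_cases hge : (fullOf PySem.Dict.empty ((PySem.Dict.ofList grid).keys.zip vals)).getD "TRAJ_POLY_DEG" 0
        ≥ (fullOf PySem.Dict.empty ((PySem.Dict.ofList grid).keys.zip vals)).getD "TRAJ_POLY_WIN" 0
    · rw [if_pos hge]
    · rw [if_neg hge, if_pos (hp (by omega))]
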